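-- pv_equiv track=rewrite | github.com/thedatatales/ui-guideline2.0 | sample-app-pages/analyze-entribe-core-classes.py | find_duplication_patterns
-- ===== SOURCE A (Python) =====
-- from collections import Counter, defaultdict
--
-- def find_duplication_patterns(custom_classes, css_classes):
--     """Find potential duplication in custom classes"""
--     duplicates = {
--         'similar_names': defaultdict(list),
--         'similar_styles': defaultdict(list)
--     }
--
--     # Group by prefix/suffix
--     prefixes = defaultdict(list)
--     suffixes = defaultdict(list)
--
--     for cls in custom_classes:
--         parts = cls.split('-')
--         if len(parts) > 1:
--             prefixes[parts[0]].append(cls)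
--         if len(parts) > 1:
--             suffixes[parts[-1]].append(cls)
--
--     duplicates['similar_names'] = {
--         k: v for k, v in prefixes.items() if len(v) > 3
--     }
--
--     return duplicates
-- ===== SOURCE B (Python) =====
-- from collections import Counter, defaultdict
--
-- def find_duplication_patterns(custom_classes, css_classes):
--     """Find potential duplication in custom classes (count-first decomposition)"""
--     # pass 1: count how many custom classes carry each dash-prefix
--     counts = Counter()
--     for cls in custom_classes:
--         parts = cls.split('-')
--         if len(parts) > 1:
--             counts[parts[0]] += 1
--     # pass 2: collect, in encounter order, the classes of prefixes seen more than 3 times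
--     similar = {}
--     for cls in custom_classes:
--         parts = cls.split('-')
--         if len(parts) > 1 and counts[parts[0]] > 3:
--             similar.setdefault(parts[0], []).append(cls)
--     return {'similar_names': similar, 'similar_styles': defaultdict(list)}
-- ===== Notes on version B (the rewrite author's own statement) =====
-- stated objective: alternative
-- what changed: Replaces A's group-everything-then-filter-the-dict pass with a count-table-first decomposition: one pass builds a Counter of prefixes, a second pass collects only classes whose prefix count exceeds 3, so no full grouping dict of rejected groups is ever built.
import Mathlib
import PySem

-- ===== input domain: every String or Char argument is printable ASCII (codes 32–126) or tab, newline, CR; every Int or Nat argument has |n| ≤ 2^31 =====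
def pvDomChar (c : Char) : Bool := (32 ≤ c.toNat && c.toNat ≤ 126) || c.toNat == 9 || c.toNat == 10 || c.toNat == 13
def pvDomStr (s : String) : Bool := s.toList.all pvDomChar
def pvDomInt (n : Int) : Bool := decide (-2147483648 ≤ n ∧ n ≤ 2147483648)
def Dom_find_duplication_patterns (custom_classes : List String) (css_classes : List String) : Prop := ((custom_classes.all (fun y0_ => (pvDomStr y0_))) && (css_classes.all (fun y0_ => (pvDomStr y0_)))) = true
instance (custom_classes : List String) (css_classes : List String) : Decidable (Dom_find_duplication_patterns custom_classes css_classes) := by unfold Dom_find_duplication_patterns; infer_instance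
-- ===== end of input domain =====

-- B replaces A's group-everything-then-filter pass by a count-prefixes-first, collect-second
-- decomposition (objective: alternative, same cost). Return-value equivalence only; neither
-- version mutates its arguments.

-- ===== PORT A =====
-- cls.split('-') : '-' is a nonempty literal separator, so PySem.Str.split? always returns
-- `some parts` with parts ≠ []; `.getD []` is exact, parts[0] = parts.headI, parts[-1] = parts.getLastD "".
def find_duplication_patterns (custom_classes : List String) (css_classes : List String) : List (String × List (String × List String)) :=
  -- duplicates = {'similar_names': defaultdict(list), 'similar_styles': defaultdict(list)}; both dicts empty until reassigned
  -- prefixes = defaultdict(list); suffixes = defaultdict(list); one loop appends into both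
  let dicts : PySem.Dict String (List String) × PySem.Dict String (List String) :=
    custom_classes.foldl (fun acc cls =>
      let parts := (PySem.Str.split? cls "-").getD []
      -- if len(parts) > 1: prefixes[parts[0]].append(cls)   (defaultdict access-then-append = modify with default [])
      let acc := if parts.length > 1 then (acc.1.modify parts.headI [] (· ++ [cls]), acc.2) else acc
      -- if len(parts) > 1: suffixes[parts[-1]].append(cls)
      let acc := if parts.length > 1 then (acc.1, acc.2.modify (parts.getLastD "") [] (· ++ [cls])) else acc
      acc) (PySem.Dict.empty, PySem.Dict.empty)
  -- duplicates['similar_names'] = {k: v for k, v in prefixes.items() if len(v) > 3}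
  let similar_names := dicts.1.items.filter (fun kv => kv.2.length > 3)
  [("similar_names", similar_names), ("similar_styles", [])]

-- ===== PORT B =====
def find_duplication_patterns_alt (custom_classes : List String) (css_classes : List String) : List (String × List (String × List String)) :=
  -- counts = Counter(); for cls ...: if len(parts) > 1: counts[parts[0]] += 1
  let counts : PySem.Dict String Int :=
    custom_classes.foldl (fun c cls =>
      let parts := (PySem.Str.split? cls "-").getD []
      if parts.length > 1 then c.modify parts.headI 0 (· + 1) else c) PySem.Dict.empty
  -- similar = {}; for cls ...: if len(parts) > 1 and counts[parts[0]] > 3: similar.setdefault(parts[0], []).append(cls)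
  -- (setdefault-then-append-in-place = modify with default [])
  let similar : PySem.Dict String (List String) :=
    custom_classes.foldl (fun d cls =>
      let parts := (PySem.Str.split? cls "-").getD []
      if parts.length > 1 ∧ counts.getD parts.headI 0 > 3 then d.modify parts.headI [] (· ++ [cls]) else d)
      PySem.Dict.empty
  [("similar_names", similar.items), ("similar_styles", [])]

-- ===== PRECONDITION & SPEC =====
def Spec_find_duplication_patterns (custom_classes : List String) (css_classes : List String) (out : List (String × List (String × List String))) : Prop := out = find_duplication_patterns_alt custom_classes css_classes
instance (custom_classes : List String) (css_classes : List String) (out : List (String × List (String × List String))) : Decidable (Spec_find_duplication_patterns custom_classes css_classes out) := by unfold Spec_find_duplication_patterns; infer_instance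

-- ===== CLAIM (what is proved, stated in full; the proofs are below) =====
def Claim_equal_find_duplication_patterns : Prop := ∀ (custom_classes : List String) (css_classes : List String), Dom_find_duplication_patterns custom_classes css_classes → Spec_find_duplication_patterns custom_classes css_classes (find_duplication_patterns custom_classes css_classes)

-- ===== LEMMAS AND PROOFS =====

-- abbreviations for the proof
def pvParts (cls : String) : List String := (PySem.Str.split? cls "-").getD []
def pvKey (cls : String) : String := (pvParts cls).headI
def pvCond (cls : String) : Bool := decide ((pvParts cls).length > 1)

-- a fold whose body fires only when `p x` holds is a fold over the filtered list
theorem pv_foldl_filter {α β : Type} (p : α → Bool) (g : β → α → β) :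
    ∀ (l : List α) (b : β),
      l.foldl (fun b x => if p x then g b x else b) b = (l.filter p).foldl g b := by
  intro l
  induction l with
  | nil => intro b; rfl
  | cons x xs ih =>
    intro b
    by_cases h : p x = true
    · simp [List.foldl, List.filter, h, ih]
    · simp [List.foldl, List.filter, h, ih]

-- the first component of A's pair fold is the prefix-only fold
theorem pv_fstFold (l : List String) (pr su : PySem.Dict String (List String)) :
    (l.foldl (fun acc cls =>
        let parts := (PySem.Str.split? cls "-").getD []
        let acc := if parts.length > 1 then (acc.1.modify parts.headI [] (· ++ [cls]), acc.2) else acc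
        let acc := if parts.length > 1 then (acc.1, acc.2.modify (parts.getLastD "") [] (· ++ [cls])) else acc
        acc) (pr, su)).1
    = l.foldl (fun d cls => if pvCond cls then d.modify (pvKey cls) [] (· ++ [cls]) else d) pr := by
  induction l generalizing pr su with
  | nil => rfl
  | cons x xs ih =>
    simp only [List.foldl]
    by_cases h : ((PySem.Str.split? x "-").getD []).length > 1
    · simp only [if_pos h]
      rw [ih]
      have hc : pvCond x = true := by simp [pvCond, pvParts, h]
      simp [hc, pvKey, pvParts]
    · simp only [if_neg h]
      rw [ih]
      have hc : pvCond x = false := by simp [pvCond, pvParts]; omega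
      simp [hc]

-- characterisation of the plain grouping fold: its items list groups m by pvKey,
-- keys in first-occurrence order, each group in encounter order
theorem pv_grp_fold_items (m : List String) :
    (m.foldl (fun d cls => d.modify (pvKey cls) [] (· ++ [cls])) PySem.Dict.empty).items
    = (PySem.Set.ofList (m.map pvKey)).map
        (fun k => (k, m.filter (fun c => pvKey c == k))) := by
  set D := m.foldl (fun d cls => d.modify (pvKey cls) [] (· ++ [cls])) PySem.Dict.empty with hD
  have hnd : D.keys.Nodup := by
    rw [hD]
    exact PySem.Dict.nodup_keys_foldl_modify_key m pvKey [] (fun _ cls => (· ++ [cls]))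
      PySem.Dict.empty PySem.Dict.nodup_keys_empty
  have hkeys : D.keys = PySem.Set.ofList (m.map pvKey) := by
    rw [hD, PySem.Dict.keys_foldl_modify_key m pvKey [] (fun _ cls => (· ++ [cls]))]
    rw [PySem.Dict.keys_empty, PySem.Set.update_nil_left]
  have hgetD : ∀ k, D.getD k [] = m.filter (fun c => pvKey c == k) := by
    intro k
    have hmap : D = ((m.map (fun c => (pvKey c, c))).foldl
        (fun d p => d.modify p.1 [] (· ++ [p.2])) PySem.Dict.empty) := by
      rw [hD, List.foldl_map]
    rw [hmap, PySem.Dict.getD_foldl_modify_append]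
    simp [List.filter_map, Function.comp_def]
  rw [PySem.Dict.items_eq_map_keys D hnd [], hkeys]
  exact List.map_congr_left (fun k _ => by rw [hgetD])

-- the counting fold counts occurrences of each key
theorem pv_counts_aux (m : List String) :
    ∀ (d : PySem.Dict String Int) (k : String),
      (m.foldl (fun c cls => c.modify (pvKey cls) 0 (· + 1)) d).getD k 0
      = d.getD k 0 + ((m.filter (fun c => pvKey c == k)).length : Int) := by
  induction m with
  | nil => intro d k; simp
  | cons x xs ih =>
    intro d k
    by_cases hx : pvKey x = k
    · subst hx
      rw [List.filter_cons_of_pos (by simp), List.foldl_cons, ih,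
        PySem.Dict.getD_modify_self, List.length_cons]
      push_cast
      ring
    · have hne : ¬ (k = pvKey x) := fun hh => hx hh.symm
      rw [List.filter_cons_of_neg (by simp [hx]), List.foldl_cons, ih,
        PySem.Dict.getD_modify, if_neg hne]

-- the count fold of port B computes group sizes (zeta-reduced form of its body)
theorem pv_counts_getD (l : List String) (k : String) :
    (l.foldl (fun (c : PySem.Dict String Int) cls =>
        if ((PySem.Str.split? cls "-").getD []).length > 1 then
          c.modify ((PySem.Str.split? cls "-").getD []).headI 0 (· + 1)
        else c) PySem.Dict.empty).getD k 0
    = (((l.filter pvCond).filter (fun c => pvKey c == k)).length : Int) := by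
  have hbody : (fun (c : PySem.Dict String Int) cls =>
        if ((PySem.Str.split? cls "-").getD []).length > 1 then
          c.modify ((PySem.Str.split? cls "-").getD []).headI 0 (· + 1)
        else c)
      = (fun c cls => if pvCond cls then c.modify (pvKey cls) 0 (· + 1) else c) := by
    funext c cls
    by_cases h : ((PySem.Str.split? cls "-").getD []).length > 1
    · have hc : pvCond cls = true := by simp [pvCond, pvParts, h]
      simp only [if_pos h, hc, if_true, pvKey, pvParts]
    · have hc : pvCond cls = false := by simp [pvCond, pvParts]; omega
      simp only [if_neg h, hc, Bool.false_eq_true, if_false]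
  rw [hbody, pv_foldl_filter, pv_counts_aux]
  simp

-- Set.ofList commutes with filter
theorem pv_ofList_filter (p : String → Bool) :
    ∀ (l : List String), PySem.Set.ofList (l.filter p) = (PySem.Set.ofList l).filter p := by
  intro l
  induction l with
  | nil => rfl
  | cons x xs ih =>
    by_cases h : p x = true
    · rw [List.filter_cons_of_pos h, PySem.Set.ofList_cons, ih, PySem.Set.ofList_cons,
        List.filter_cons_of_pos h, PySem.Set.discard, PySem.Set.discard,
        List.filter_filter, List.filter_filter]
      congr 1
      exact List.filter_congr (fun y _ => Bool.and_comm _ _)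
    · have h' : p x = false := by simpa using h
      have hnp : ¬ (p x = true) := by simp [h']
      rw [List.filter_cons_of_neg hnp, PySem.Set.ofList_cons, ih,
        List.filter_cons_of_neg hnp, PySem.Set.discard, List.filter_filter]
      apply List.filter_congr
      intro y _
      by_cases hy : y = x
      · subst hy; simp [h']
      · simp [hy]

theorem find_duplication_patterns_spec' :
    ∀ (custom_classes css_classes : List String),
      find_duplication_patterns custom_classes css_classes
        = find_duplication_patterns_alt custom_classes css_classes := by
  intro l css
  unfold find_duplication_patterns find_duplication_patterns_alt
  simp only []
  congr 1
  congr 1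
  -- A side: items of the full grouping dict, filtered by size > 3, as a map over the key set
  rw [pv_fstFold, pv_foldl_filter, pv_grp_fold_items, List.filter_map]
  -- B side: turn the conditional fold into the plain grouping fold over the twice-filtered list
  have hbodyB : (fun (d : PySem.Dict String (List String)) cls =>
        if ((PySem.Str.split? cls "-").getD []).length > 1 ∧
            (l.foldl (fun (c : PySem.Dict String Int) cls =>
              if ((PySem.Str.split? cls "-").getD []).length > 1 then
                c.modify ((PySem.Str.split? cls "-").getD []).headI 0 (· + 1)
              else c) PySem.Dict.empty).getD ((PySem.Str.split? cls "-").getD []).headI 0 > 3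
        then d.modify ((PySem.Str.split? cls "-").getD []).headI [] (· ++ [cls]) else d)
      = (fun d cls => if (pvCond cls &&
            decide (((l.filter pvCond).filter (fun c => pvKey c == pvKey cls)).length > 3))
          then d.modify (pvKey cls) [] (· ++ [cls]) else d) := by
    funext d cls
    simp only [pv_counts_getD l]
    by_cases h1 : ((PySem.Str.split? cls "-").getD []).length > 1
    · have hc : pvCond cls = true := by simp [pvCond, pvParts, h1]
      have hk : ((PySem.Str.split? cls "-").getD []).headI = pvKey cls := rfl
      by_cases h2 : ((l.filter pvCond).filter (fun c => pvKey c == pvKey cls)).length > 3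
      · have h2' : (3 : Int) <
            (((l.filter pvCond).filter (fun c => pvKey c == pvKey cls)).length : Int) := by
          exact_mod_cast h2
        have hd : decide (((l.filter pvCond).filter
            (fun c => pvKey c == pvKey cls)).length > 3) = true := decide_eq_true h2
        have hcondT : (pvCond cls && decide (((l.filter pvCond).filter
            (fun c => pvKey c == pvKey cls)).length > 3)) = true := by rw [hc, hd]; rfl
        rw [hk]
        rw [if_pos ⟨h1, h2'⟩, if_pos hcondT]
      · have h2' : ¬ ((3 : Int) <
            (((l.filter pvCond).filter (fun c => pvKey c == pvKey cls)).length : Int)) := by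
          intro hc2; exact h2 (by exact_mod_cast hc2)
        have hd : decide (((l.filter pvCond).filter
            (fun c => pvKey c == pvKey cls)).length > 3) = false := decide_eq_false h2
        have hcondF : (pvCond cls && decide (((l.filter pvCond).filter
            (fun c => pvKey c == pvKey cls)).length > 3)) = false := by
          rw [hd, Bool.and_false]
        rw [hk]
        rw [if_neg (fun hh => h2' hh.2),
          if_neg (by rw [hcondF]; exact Bool.false_ne_true)]
    · have hc : pvCond cls = false := by simp [pvCond, pvParts]; omega
      rw [if_neg (fun hh => h1 hh.1), if_neg (by simp [hc])]
  rw [hbodyB, pv_foldl_filter]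
  have hQ2 : l.filter (fun cls => pvCond cls &&
        decide (((l.filter pvCond).filter (fun c => pvKey c == pvKey cls)).length > 3))
      = (l.filter pvCond).filter (fun cls =>
          decide (((l.filter pvCond).filter (fun c => pvKey c == pvKey cls)).length > 3)) := by
    rw [List.filter_filter]
    exact List.filter_congr (by intro x _; rw [Bool.and_comm])
  rw [hQ2, pv_grp_fold_items]
  -- both sides are maps over key sets now; identify the two key sets
  have h1 : ((l.filter pvCond).filter (fun cls =>
        decide (((l.filter pvCond).filter (fun c => pvKey c == pvKey cls)).length > 3))).map pvKey
      = ((l.filter pvCond).map pvKey).filter (fun k =>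
          decide (((l.filter pvCond).filter (fun c => pvKey c == k)).length > 3)) := by
    rw [List.filter_map]
    rfl
  have hSets : PySem.Set.ofList (((l.filter pvCond).filter (fun cls =>
        decide (((l.filter pvCond).filter (fun c => pvKey c == pvKey cls)).length > 3))).map pvKey)
      = (PySem.Set.ofList ((l.filter pvCond).map pvKey)).filter (fun k =>
          decide (((l.filter pvCond).filter (fun c => pvKey c == k)).length > 3)) := by
    rw [h1, pv_ofList_filter]
  rw [hSets]
  -- the two maps agree key by key on the surviving keys
  apply List.map_congr_left
  intro k hk
  have hPk : decide (((l.filter pvCond).filter (fun c => pvKey c == k)).length > 3) = true :=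
    (List.mem_filter.mp hk).2
  have hgrp : ((l.filter pvCond).filter (fun cls =>
        decide (((l.filter pvCond).filter (fun c => pvKey c == pvKey cls)).length > 3))).filter
        (fun c => pvKey c == k)
      = (l.filter pvCond).filter (fun c => pvKey c == k) := by
    rw [List.filter_filter]
    apply List.filter_congr
    intro a _
    by_cases ha : pvKey a = k
    · rw [ha, hPk, Bool.and_true]
    · have hb : (pvKey a == k) = false := by simp [ha]
      rw [hb, Bool.false_and]
  rw [hgrp]

-- ===== VERDICT (by name: the statement is the Claim_ definition above) =====
theorem find_duplication_patterns_spec : Claim_equal_find_duplication_patterns := by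
  intro custom_classes css_classes _
  unfold Spec_find_duplication_patterns
  exact find_duplication_patterns_spec' custom_classes css_classes
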